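-- pv_equiv track=rewrite | github.com/Swordshinehjy/Polymer-Persistence-Length | src/polymer_pl/relaxed_dihedral_scan.py | bfs_rotating_group
-- ===== SOURCE A (Python) =====
-- from collections import deque
--
-- def bfs_rotating_group(adj_list, axis_atom1, axis_atom2):
--     """
--     Find atoms that need to be rotated around a given axis
--     :param adj_list: connectivity list (adjacency list)
--     :param axis_atom1: rotation axis atom 1 index (0-based)
--     :param axis_atom2: rotation axis atom 2 index (0-based)
--     :return: rotating group atom indices (0-based)
--     """
--     n_atoms = len(adj_list)
--     visited = [False] * n_atoms
--     queue = deque([axis_atom2])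
--     visited[axis_atom2] = True
--     visited[axis_atom1] = True  # 锁定轴原子1侧
--
--     rotating_group = []
--
--     while queue:
--         current = queue.popleft()
--         rotating_group.append(current)
--         for neighbor in adj_list[current]:
--             if not visited[neighbor]:
--                 visited[neighbor] = True
--                 queue.append(neighbor)
--
--     return rotating_group
-- ===== SOURCE B (Python) =====
-- def bfs_rotating_group(adj_list, axis_atom1, axis_atom2):
--     n_atoms = len(adj_list)
--     visited = [False] * n_atoms
--     visited[axis_atom2] = True
--     visited[axis_atom1] = True
--     rotating_group = []
--     frontier = [axis_atom2]
--     while frontier: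
--         next_frontier = []
--         for node in frontier:
--             rotating_group.append(node)
--             for nb in adj_list[node]:
--                 if not visited[nb]:
--                     visited[nb] = True
--                     next_frontier.append(nb)
--         frontier = next_frontier
--     return rotating_group
-- ===== Notes on version B (the rewrite author's own statement) =====
-- stated objective: alternative
-- what changed: Replaces the deque-based FIFO BFS loop with a level-synchronous BFS: an outer while over frontiers that builds next_frontier per level, so no queue/deque is maintained.
-- outside the precondition, e.g. on bfs_rotating_group([[], [2]], 0, 0): A returns [0], B returns [0]
import Mathlib
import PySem

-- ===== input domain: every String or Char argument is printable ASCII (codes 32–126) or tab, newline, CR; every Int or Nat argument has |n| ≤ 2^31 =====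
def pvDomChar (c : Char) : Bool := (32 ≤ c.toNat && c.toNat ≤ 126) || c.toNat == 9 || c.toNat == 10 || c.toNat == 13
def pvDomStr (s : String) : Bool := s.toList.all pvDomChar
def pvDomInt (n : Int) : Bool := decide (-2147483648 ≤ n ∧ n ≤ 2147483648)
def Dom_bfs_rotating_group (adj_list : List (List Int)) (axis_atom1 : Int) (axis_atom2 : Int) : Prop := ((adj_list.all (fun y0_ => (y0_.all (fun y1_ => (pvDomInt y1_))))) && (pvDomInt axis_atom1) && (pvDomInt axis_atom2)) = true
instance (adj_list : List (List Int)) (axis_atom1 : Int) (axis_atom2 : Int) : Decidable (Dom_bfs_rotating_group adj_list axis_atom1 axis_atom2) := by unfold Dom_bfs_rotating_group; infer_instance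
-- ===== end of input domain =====

-- B rewrites A's deque-based BFS as a level-synchronous BFS (frontier / next_frontier), same output order; objective: alternative decomposition, not speed.

-- number of still-unvisited entries (termination measure for both ports)
def pvCountF (v : List Bool) : Nat := v.count false

theorem pvCount_set_true (v : List Bool) (k : Nat) (h : v[k]? = some false) :
    (v.set k true).count false + 1 = v.count false := by
  induction v generalizing k with
  | nil => simp at h
  | cons b bs ih =>
    cases k with
    | zero => simp_all
    | succ k =>
      simp only [List.getElem?_cons_succ] at h
      cases b <;> simp [List.set, ih k h]

-- pyGetD v i true = false forces an in-range read of false; setting it true drops the count by one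
theorem pvSetD_count (v : List Bool) (i : Int) (h : PySem.List.pyGetD v i true = false) :
    pvCountF (PySem.List.pySetD v i true) + 1 = pvCountF v := by
  unfold pvCountF
  unfold PySem.List.pyGetD PySem.List.pyGet? at h
  unfold PySem.List.pySetD PySem.List.pySet?
  cases hk : PySem.List.pyIdx? v.length i with
  | none => simp [hk] at h
  | some k =>
    simp only [hk] at h ⊢
    cases hg : v[k]? with
    | none => simp [hg] at h
    | some b =>
      cases b
      · simpa using pvCount_set_true v k hg
      · simp [hg] at h

-- ===== PORT A =====
-- inner 'for neighbor in adj_list[current]' loop of A: mark unvisited neighbors, collect the newly enqueued ones in order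
def pvVisit (v : List Bool) : List Int → List Bool × List Int
  | [] => (v, [])
  | nb :: rest =>
    if PySem.List.pyGetD v nb true = false then
      let r := pvVisit (PySem.List.pySetD v nb true) rest
      (r.1, nb :: r.2)
    else pvVisit v rest

theorem pvVisit_count (ns : List Int) (v : List Bool) :
    pvCountF (pvVisit v ns).1 + (pvVisit v ns).2.length = pvCountF v := by
  induction ns generalizing v with
  | nil => simp [pvVisit]
  | cons nb rest ih =>
    by_cases h : PySem.List.pyGetD v nb true = false
    · have := pvSetD_count v nb h
      simp only [pvVisit, if_pos h, List.length_cons]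
      have := ih (PySem.List.pySetD v nb true)
      omega
    · simpa [pvVisit, if_neg h] using ih v

-- A's 'while queue' loop (queue as list, popleft = head)
def pvBfsA (adj : List (List Int)) (v : List Bool) (q : List Int) : List Int :=
  match q with
  | [] => []
  | c :: rest =>
    let r := pvVisit v (PySem.List.pyGetD adj c [])
    c :: pvBfsA adj r.1 (rest ++ r.2)
termination_by (pvCountF v, q.length)
decreasing_by
  have h := pvVisit_count (PySem.List.pyGetD adj c []) v
  rcases List.eq_nil_or_concat (pvVisit v (PySem.List.pyGetD adj c [])).2 with he | ⟨_, _, he⟩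
  · have hc : pvCountF (pvVisit v (PySem.List.pyGetD adj c [])).1 = pvCountF v := by
      simp [he] at h; omega
    rw [hc, he]
    exact Prod.Lex.right _ (by simp)
  · have hl : (pvVisit v (PySem.List.pyGetD adj c [])).2.length ≠ 0 := by simp [he]
    exact Prod.Lex.left _ _ (by omega)

def bfs_rotating_group (adj_list : List (List Int)) (axis_atom1 : Int) (axis_atom2 : Int) : List Int :=
  let n_atoms := adj_list.length
  let visited0 : List Bool := List.replicate n_atoms false
  let visited1 := PySem.List.pySetD visited0 axis_atom2 true
  let visited2 := PySem.List.pySetD visited1 axis_atom1 true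
  pvBfsA adj_list visited2 [axis_atom2]

-- ===== PORT B =====
-- B's inner 'for node in frontier' loop: marks neighbors node by node, collecting next_frontier
def pvProc (adj : List (List Int)) (v : List Bool) : List Int → List Bool × List Int
  | [] => (v, [])
  | node :: rest =>
    let r := pvVisit v (PySem.List.pyGetD adj node [])
    let s := pvProc adj r.1 rest
    (s.1, r.2 ++ s.2)

theorem pvProc_count (adj : List (List Int)) (q : List Int) (v : List Bool) :
    pvCountF (pvProc adj v q).1 + (pvProc adj v q).2.length = pvCountF v := by
  induction q generalizing v with
  | nil => simp [pvProc]
  | cons node rest ih =>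
    simp only [pvProc, List.length_append]
    have h1 := pvVisit_count (PySem.List.pyGetD adj node []) v
    have h2 := ih (pvVisit v (PySem.List.pyGetD adj node [])).1
    omega

-- B's outer 'while frontier' loop: emit the whole frontier, recurse on next_frontier
def pvBfsB (adj : List (List Int)) (v : List Bool) (q : List Int) : List Int :=
  match q with
  | [] => []
  | c :: rest =>
    let s := pvProc adj v (c :: rest)
    (c :: rest) ++ pvBfsB adj s.1 s.2
termination_by (pvCountF v, q.length)
decreasing_by
  have h := pvProc_count adj (c :: rest) v
  rcases List.eq_nil_or_concat (pvProc adj v (c :: rest)).2 with he | ⟨_, _, he⟩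
  · have hc : pvCountF (pvProc adj v (c :: rest)).1 = pvCountF v := by
      simp [he] at h; omega
    rw [hc, he]
    exact Prod.Lex.right _ (by simp)
  · have hl : (pvProc adj v (c :: rest)).2.length ≠ 0 := by simp [he]
    exact Prod.Lex.left _ _ (by omega)

def bfs_rotating_group_alt (adj_list : List (List Int)) (axis_atom1 : Int) (axis_atom2 : Int) : List Int :=
  let n_atoms := adj_list.length
  let visited0 : List Bool := List.replicate n_atoms false
  let visited1 := PySem.List.pySetD visited0 axis_atom2 true
  let visited2 := PySem.List.pySetD visited1 axis_atom1 true
  pvBfsB adj_list visited2 [axis_atom2]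

-- ===== PRECONDITION & SPEC =====
-- Pre_ excludes inputs on which A can raise IndexError: an axis index or an adjacency entry outside
-- [-n, n). Entries only matter when A actually reaches them, so Pre_ is slightly conservative: it also
-- excludes graphs whose only out-of-range entries are unreachable (A returns normally there).
def Pre_bfs_rotating_group (adj_list : List (List Int)) (axis_atom1 : Int) (axis_atom2 : Int) : Prop :=
  PySem.Raise.InRange adj_list.length axis_atom1 ∧
  PySem.Raise.InRange adj_list.length axis_atom2 ∧
  ∀ row ∈ adj_list, ∀ x ∈ row, PySem.Raise.InRange adj_list.length x
instance (adj_list : List (List Int)) (axis_atom1 : Int) (axis_atom2 : Int) : Decidable (Pre_bfs_rotating_group adj_list axis_atom1 axis_atom2) := by unfold Pre_bfs_rotating_group; infer_instance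

def pvWitness_bfs_rotating_group : List (List Int) × Int × Int := ([[1], [0, 2], [1]], 0, 1)

def Spec_bfs_rotating_group (adj_list : List (List Int)) (axis_atom1 : Int) (axis_atom2 : Int) (out : List Int) : Prop := out = bfs_rotating_group_alt adj_list axis_atom1 axis_atom2
instance (adj_list : List (List Int)) (axis_atom1 : Int) (axis_atom2 : Int) (out : List Int) : Decidable (Spec_bfs_rotating_group adj_list axis_atom1 axis_atom2 out) := by unfold Spec_bfs_rotating_group; infer_instance

-- ===== CLAIM (what is proved, stated in full; the proofs are below) =====
def Claim_equal_bfs_rotating_group : Prop := ∀ (adj_list : List (List Int)) (axis_atom1 : Int) (axis_atom2 : Int), Dom_bfs_rotating_group adj_list axis_atom1 axis_atom2 → Pre_bfs_rotating_group adj_list axis_atom1 axis_atom2 → Spec_bfs_rotating_group adj_list axis_atom1 axis_atom2 (bfs_rotating_group adj_list axis_atom1 axis_atom2)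

-- ===== LEMMAS AND PROOFS =====

-- processing a prefix q of the queue emits q and queues its new children behind the pending part s
theorem pvBfsA_append (adj : List (List Int)) (q : List Int) :
    ∀ (v : List Bool) (s : List Int),
      pvBfsA adj v (q ++ s) = q ++ pvBfsA adj (pvProc adj v q).1 (s ++ (pvProc adj v q).2) := by
  induction q with
  | nil => intro v s; simp [pvProc]
  | cons c rest ih =>
    intro v s
    rw [List.cons_append, pvBfsA]
    simp only [pvProc]
    rw [List.append_assoc, ih]
    simp [List.append_assoc]

theorem pvBfs_eq (adj : List (List Int)) (v : List Bool) (q : List Int) :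
    pvBfsA adj v q = pvBfsB adj v q := by
  induction v, q using pvBfsB.induct adj with
  | case1 v => simp [pvBfsA, pvBfsB]
  | case2 v c rest s ih =>
    rw [pvBfsB]
    have h := pvBfsA_append adj (c :: rest) v []
    simp only [List.append_nil, List.nil_append] at h
    rw [h, ih]

-- ===== VERDICT (by name: the statement is the Claim_ definition above) =====
theorem bfs_rotating_group_spec : Claim_equal_bfs_rotating_group := by
  intro adj_list axis_atom1 axis_atom2 _ _
  unfold Spec_bfs_rotating_group bfs_rotating_group bfs_rotating_group_alt
  exact pvBfs_eq _ _ _
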